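-- pv_equiv track=rewrite | github.com/developer-egg/hackerrank | birthday_candles.py | birthday_candles
-- ===== SOURCE A (Python) =====
-- def birthday_candles(candles):
--     tallest_candle = candles[0]
--
--     for candle in candles:
--         if candle > tallest_candle:
--             tallest_candle = candle
--
--     tallest_candle_count = 0
--
--     for candle in candles:
--         if candle == tallest_candle:
--             tallest_candle_count += 1
--
--     return tallest_candle_count
-- ===== SOURCE B (Python) =====
-- def birthday_candles(candles):
--     tallest = candles[0]
--     count = 0
--     for candle in candles:
--         if candle > tallest:
--             tallest = candle
--             count = 1
--         elif candle == tallest: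
--             count += 1
--     return count
-- ===== Notes on version B (the rewrite author's own statement) =====
-- stated objective: alternative
-- what changed: Replaces A's two separate scans (one to find the max, one to count it) with a single fused pass that maintains the running max and its count together, resetting the count to 1 whenever a taller candle appears.
import Mathlib
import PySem

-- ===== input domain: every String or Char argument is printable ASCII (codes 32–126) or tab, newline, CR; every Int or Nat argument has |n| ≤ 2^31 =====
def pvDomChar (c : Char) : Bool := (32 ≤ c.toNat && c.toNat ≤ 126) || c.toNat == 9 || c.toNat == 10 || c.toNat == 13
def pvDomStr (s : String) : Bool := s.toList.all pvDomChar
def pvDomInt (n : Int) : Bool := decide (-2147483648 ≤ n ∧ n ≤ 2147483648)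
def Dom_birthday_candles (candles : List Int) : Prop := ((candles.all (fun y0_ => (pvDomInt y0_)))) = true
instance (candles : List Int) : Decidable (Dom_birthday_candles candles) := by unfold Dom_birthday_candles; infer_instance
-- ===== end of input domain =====

-- B fuses A's two scans (find-max then count-max) into one pass maintaining max and count together.


-- ===== PORT A =====
-- first for-loop of A: running maximum
def pvMaxLoop : List Int → Int → Int
  | [], t => t
  | c :: cs, t => pvMaxLoop cs (if c > t then c else t)

-- second for-loop of A: count occurrences of m
def pvCntLoop : List Int → Int → Int → Int
  | [], _, acc => acc
  | c :: cs, m, acc => pvCntLoop cs m (if c == m then acc + 1 else acc)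

def birthday_candles (candles : List Int) : Int :=
  match candles with
  | [] => 0   -- Python raises IndexError here; excluded by Pre_
  | c0 :: _ => pvCntLoop candles (pvMaxLoop candles c0) 0

-- ===== PORT B =====
-- B's single fused pass: state (tallest, count), reset count to 1 on a new maximum
def pvFusedLoop : List Int → Int → Int → Int
  | [], _, count => count
  | c :: cs, tallest, count =>
      if c > tallest then pvFusedLoop cs c 1
      else if c == tallest then pvFusedLoop cs tallest (count + 1)
      else pvFusedLoop cs tallest count

def birthday_candles_alt (candles : List Int) : Int :=
  match candles with
  | [] => 0   -- Python raises IndexError here; excluded by Pre_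
  | c0 :: _ => pvFusedLoop candles c0 0

-- ===== PRECONDITION & SPEC =====
-- Both Pythons raise IndexError on the empty list (candles[0]); Pre_ excludes exactly that.
def Pre_birthday_candles (candles : List Int) : Prop := candles ≠ []
instance (candles : List Int) : Decidable (Pre_birthday_candles candles) := by unfold Pre_birthday_candles; infer_instance
def pvWitness_birthday_candles : List Int := [4, 4, 1, 3]

def Spec_birthday_candles (candles : List Int) (out : Int) : Prop := out = birthday_candles_alt candles
instance (candles : List Int) (out : Int) : Decidable (Spec_birthday_candles candles out) := by unfold Spec_birthday_candles; infer_instance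

-- ===== CLAIM =====
def Claim_equal_birthday_candles : Prop := ∀ (candles : List Int), Dom_birthday_candles candles → Pre_birthday_candles candles → Spec_birthday_candles candles (birthday_candles candles)

-- ===== LEMMAS AND PROOFS =====
theorem pvMaxLoop_ge (l : List Int) (t : Int) : t ≤ pvMaxLoop l t := by
  induction l generalizing t with
  | nil => simp [pvMaxLoop]
  | cons x xs ih =>
      simp only [pvMaxLoop]
      split
      · exact le_trans (by omega) (ih x)
      · exact ih t

theorem pvCntLoop_acc (l : List Int) (m acc : Int) :
    pvCntLoop l m acc = acc + pvCntLoop l m 0 := by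
  induction l generalizing acc with
  | nil => simp [pvCntLoop]
  | cons x xs ih =>
      simp only [pvCntLoop]
      split
      · rw [ih (acc + 1), ih (0 + 1)]; omega
      · exact ih acc

theorem pvFusedLoop_eq (l : List Int) (t c : Int) :
    pvFusedLoop l t c =
      if pvMaxLoop l t = t then c + pvCntLoop l (pvMaxLoop l t) 0
      else pvCntLoop l (pvMaxLoop l t) 0 := by
  induction l generalizing t c with
  | nil => simp [pvFusedLoop, pvMaxLoop, pvCntLoop]
  | cons x xs ih =>
      simp only [pvFusedLoop, pvMaxLoop, pvCntLoop]
      by_cases hx : x > t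
      · simp only [if_pos hx]
        have hM := pvMaxLoop_ge xs x
        have hMt : pvMaxLoop xs x ≠ t := by omega
        rw [ih x 1, if_neg hMt]
        by_cases hxm : pvMaxLoop xs x = x
        · have hb : (x == pvMaxLoop xs x) = true := beq_iff_eq.mpr hxm.symm
          rw [if_pos hxm, hb]
          simp only [reduceIte]
          rw [pvCntLoop_acc xs (pvMaxLoop xs x) (0 + 1)]
          omega
        · have hb : (x == pvMaxLoop xs x) = false := by
            simp only [beq_eq_false_iff_ne, ne_eq]
            intro h; exact hxm h.symm
          rw [if_neg hxm, hb]
          norm_num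
      · simp only [if_neg hx]
        have hM := pvMaxLoop_ge xs t
        by_cases hxe : x = t
        · have hbe : (x == t) = true := beq_iff_eq.mpr hxe
          rw [hbe]
          simp only [reduceIte]
          rw [ih t (c + 1)]
          by_cases hMt : pvMaxLoop xs t = t
          · have hb : (x == pvMaxLoop xs t) = true := beq_iff_eq.mpr (by omega)
            rw [if_pos hMt, if_pos hMt, hb]
            simp only [reduceIte]
            rw [pvCntLoop_acc xs (pvMaxLoop xs t) (0 + 1)]
            omega
          · have hb : (x == pvMaxLoop xs t) = false := by
              simp only [beq_eq_false_iff_ne, ne_eq]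
              intro h; exact hMt (by omega)
            rw [if_neg hMt, if_neg hMt, hb]
            norm_num
        · have hbe : (x == t) = false := by simp [hxe]
          rw [hbe]
          norm_num
          rw [ih t c]
          have hxM : ¬ x = pvMaxLoop xs t := by
            intro h
            rcases lt_or_eq_of_le hM with h1 | h1
            · omega
            · exact hxe (by omega)
          rw [if_neg hxM]

-- ===== VERDICT =====
theorem birthday_candles_spec : Claim_equal_birthday_candles := by
  intro candles _ hpre
  cases candles with
  | nil => exact absurd rfl hpre
  | cons c0 cs =>
      unfold Spec_birthday_candles
      simp only [birthday_candles, birthday_candles_alt]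
      rw [pvFusedLoop_eq]
      split <;> omega
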